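-- pv_equiv track=rewrite | github.com/edos10/information_search_components | fm_index/pkg/helpers.py | lexicographic_count_symbols
-- ===== SOURCE A (Python) =====
-- from collections import Counter
-- from typing import SupportsIndex, Iterable, Sized
--
-- def lexicographic_count_symbols(s: SupportsIndex | Iterable) -> dict:
--     """
--     :param s: принимает строку (пока)
--     :return: словарь, где ключ - символ, а его значение - количество символов в тексте, лексикографически меньших, чем он
--     """
--     counter: Counter = Counter(s)
--     res: dict = dict()
--
--     total: int = 0
--     for sym in sorted(counter):
--         res[sym] = total
--         total += counter[sym]
--
--     return res
-- ===== SOURCE B (Python) =====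
-- def lexicographic_count_symbols(s):
--     """
--     :param s: строка (или iterable символов)
--     :return: словарь: символ -> число символов в тексте, лексикографически меньших его
--     """
--     seq = list(s)
--     return {c: sum(1 for x in seq if x < c) for c in sorted(set(seq))}
-- ===== Notes on version B (the rewrite author's own statement) =====
-- stated objective: simpler
-- what changed: B drops the Counter and the running prefix-sum accumulator entirely: for each distinct symbol (in sorted order) it directly counts the characters strictly smaller than it in one comprehension.
import Mathlib
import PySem

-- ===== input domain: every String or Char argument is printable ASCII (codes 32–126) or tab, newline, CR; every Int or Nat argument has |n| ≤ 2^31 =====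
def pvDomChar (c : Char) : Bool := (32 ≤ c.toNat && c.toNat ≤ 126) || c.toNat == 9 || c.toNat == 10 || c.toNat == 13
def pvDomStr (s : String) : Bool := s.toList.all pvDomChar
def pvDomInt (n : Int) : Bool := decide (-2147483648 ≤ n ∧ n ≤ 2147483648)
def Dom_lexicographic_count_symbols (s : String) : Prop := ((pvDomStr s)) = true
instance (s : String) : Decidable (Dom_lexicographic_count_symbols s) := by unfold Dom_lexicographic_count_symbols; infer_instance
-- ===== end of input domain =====

-- B drops the Counter and the running total: for each sorted distinct symbol it directly
-- counts the strictly smaller characters (simpler decomposition, not claimed faster).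

-- ===== PORT A =====
def lexicographic_count_symbols (s : String) : List (String × Int) :=
  let counter : PySem.Dict Char Int := PySem.Dict.counter s.toList
  let res := (PySem.List.sorted counter.keys (fun c => c) false).foldl
      (fun (st : PySem.Dict Char Int × Int) sym =>
        (st.1.insert sym st.2, st.2 + counter.getD sym 0)) (PySem.Dict.empty, 0)
  res.1.items.map (fun p => (String.ofList [p.1], p.2))

-- ===== PORT B =====
-- 'sum(1 for x in seq if x < c)' is ported as countP, exact for this generator sum.
def lexicographic_count_symbols_alt (s : String) : List (String × Int) :=
  let seq := s.toList
  (PySem.List.sorted (PySem.Set.ofList seq) (fun c => c) false).map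
    (fun c => (String.ofList [c], ((seq.countP (fun x => decide (x < c)) : Nat) : Int)))

-- ===== PRECONDITION & SPEC =====
def Spec_lexicographic_count_symbols (s : String) (out : List (String × Int)) : Prop := out = lexicographic_count_symbols_alt s
instance (s : String) (out : List (String × Int)) : Decidable (Spec_lexicographic_count_symbols s out) := by unfold Spec_lexicographic_count_symbols; infer_instance

-- ===== CLAIM (what is proved, stated in full; the proofs are below) =====
def Claim_equal_lexicographic_count_symbols : Prop := ∀ (s : String), Dom_lexicographic_count_symbols s → Spec_lexicographic_count_symbols s (lexicographic_count_symbols s)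

-- ===== LEMMAS AND PROOFS =====

theorem countP_split (t : List Char) (p q r : Char → Bool)
    (h : ∀ x ∈ t, p x = (q x || r x) ∧ ¬(q x = true ∧ r x = true)) :
    t.countP p = t.countP q + t.countP r := by
  induction t with
  | nil => simp
  | cons x t ih =>
    have hx := h x (by simp)
    have ih' := ih (fun y hy => h y (by simp [hy]))
    rcases hq : q x <;> rcases hr : r x <;> simp_all <;> omega

def aSpec (cnt : Char → Int) : List Char → Int → List (Char × Int)
  | [], _ => []
  | c :: ks, tot => (c, tot) :: aSpec cnt ks (tot + cnt c)

theorem afold_items (cnt : Char → Int) :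
    ∀ (ks : List Char) (d : PySem.Dict Char Int) (tot : Int), ks.Nodup →
      (∀ c ∈ ks, d.contains c = false) →
      ((ks.foldl (fun st sym => (st.1.insert sym st.2, st.2 + cnt sym)) (d, tot)).1).items
        = d.items ++ aSpec cnt ks tot := by
  intro ks
  induction ks with
  | nil => intro d tot _ _; simp [aSpec]
  | cons c ks ih =>
    intro d tot hnd hfresh
    simp only [List.foldl_cons, aSpec]
    rw [ih (d.insert c tot) (tot + cnt c) (List.Nodup.of_cons hnd) ?_]
    · rw [PySem.Dict.items_insert_of_not_contains _ _ (hfresh c (by simp))]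
      simp
    · intro c' hc'
      have hne : c' ≠ c := by
        rintro rfl; exact (List.nodup_cons.mp hnd).1 hc'
      rw [PySem.Dict.contains_insert]
      simp [hne, hfresh c' (by simp [hc'])]

theorem aSpec_eq (t : List Char) :
    ∀ (K : List Char) (tot : Int), K.Pairwise (· < ·) →
      (∀ x ∈ t, x ∈ K ∨ ∀ c ∈ K, x < c) →
      tot = (t.countP (fun x => decide (∀ c ∈ K, x < c)) : Int) →
      aSpec (fun c => (t.count c : Int)) K tot
        = K.map (fun c => (c, (t.countP (fun x => decide (x < c)) : Int))) := by
  intro K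
  induction K with
  | nil => intro tot _ _ _; simp [aSpec]
  | cons c K ih =>
    intro tot hp hcov htot
    have hcK := (List.pairwise_cons.mp hp).1
    have hpK := (List.pairwise_cons.mp hp).2
    simp only [aSpec, List.map_cons]
    have h1n : t.countP (fun x => decide (∀ c' ∈ c :: K, x < c'))
        = t.countP (fun x => decide (x < c)) := by
      apply List.countP_congr
      intro x hx
      simp only [decide_eq_true_eq]
      constructor
      · intro h; exact h c (by simp)
      · intro hxc k hk
        rcases List.mem_cons.mp hk with rfl | hk
        · exact hxc
        · exact lt_trans hxc (hcK k hk)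
    have h1 : tot = ((t.countP (fun x => decide (x < c)) : Nat) : Int) := by
      rw [htot, h1n]
    rw [h1]
    congr 1
    refine ih _ hpK ?_ ?_
    · intro x hx
      rcases hcov x hx with hmem | hall
      · rcases List.mem_cons.mp hmem with rfl | hm
        · right; exact hcK
        · left; exact hm
      · right; exact fun k hk => hall k (by simp [hk])
    · have hsplit : t.countP (fun x => decide (∀ k ∈ K, x < k))
          = t.countP (fun x => decide (∀ k ∈ c :: K, x < k)) + t.countP (fun x => x == c) := by
        apply countP_split
        intro x hx
        constructor
        · by_cases hxc : x = c
          · subst hxc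
            simp only [beq_self_eq_true, Bool.or_true, decide_eq_true_eq]
            exact fun k hk => hcK k hk
          · simp only [beq_eq_false_iff_ne.mpr hxc, Bool.or_false]
            rcases hcov x hx with hmem | hall
            · rcases List.mem_cons.mp hmem with rfl | hm
              · exact absurd rfl hxc
              · have h1' : ¬ (∀ k ∈ K, x < k) := fun h => lt_irrefl x (h x hm)
                have h2' : ¬ (∀ k ∈ c :: K, x < k) := fun h => lt_irrefl x (h x (by simp [hm]))
                simp [h1']
            · have hK : ∀ k ∈ K, x < k := fun k hk => hall k (by simp [hk])
              simp [hall]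
        · rintro ⟨ha, hb⟩
          have hxc : x = c := by simpa using hb
          subst hxc
          exact absurd ((of_decide_eq_true ha) x (by simp)) (lt_irrefl x)
      have hcnt : t.count c = t.countP (fun x => x == c) := List.count_eq_countP
      rw [← h1n, hsplit, hcnt]
      push_cast
      ring

theorem main_chars (l : List Char) :
    ((PySem.List.sorted (PySem.Dict.counter l).keys (fun c => c) false).foldl
        (fun (st : PySem.Dict Char Int × Int) sym =>
          (st.1.insert sym st.2, st.2 + (PySem.Dict.counter l).getD sym 0)) (PySem.Dict.empty, 0)).1.items
      = (PySem.List.sorted (PySem.Set.ofList l) (fun c => c) false).map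
          (fun c => (c, ((l.countP (fun x => decide (x < c)) : Nat) : Int))) := by
  set K := PySem.List.sorted (PySem.Set.ofList l) (fun c => c) false with hK_def
  have hKpw : K.Pairwise (· < ·) := PySem.List.sorted_ofList_pairwise_lt l
  have hKmem : ∀ x, x ∈ K ↔ x ∈ l := by
    intro x
    rw [hK_def, PySem.List.mem_sorted, PySem.Set.mem_ofList]
  have hKnd : K.Nodup := (PySem.List.sorted_perm _ _ _).nodup_iff.mpr (PySem.Set.nodup_ofList l)
  rw [PySem.Dict.keys_counter, ← hK_def]
  have hA := afold_items (fun c => ((PySem.Dict.counter l).getD c 0 : Int)) K PySem.Dict.empty 0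
    hKnd (fun c _ => PySem.Dict.contains_empty c)
  rw [hA]
  have hfun : (fun c => ((PySem.Dict.counter l).getD c 0 : Int)) = (fun c => (l.count c : Int)) := by
    funext c
    rw [PySem.Dict.getD_counter]
  rw [hfun]
  rw [aSpec_eq l K 0 hKpw ?cov ?tot]
  case cov =>
    intro x hx
    exact Or.inl ((hKmem x).mpr hx)
  case tot =>
    have : l.countP (fun x => decide (∀ c ∈ K, x < c)) = 0 := by
      rw [List.countP_eq_zero]
      intro x hx
      simp only [decide_eq_true_eq]
      exact fun h => lt_irrefl x (h x ((hKmem x).mpr hx))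
    simp [this]
  simp [PySem.Dict.items, PySem.Dict.empty]

-- ===== VERDICT (by name: the statement is the Claim_ definition above) =====
theorem lexicographic_count_symbols_spec : Claim_equal_lexicographic_count_symbols := by
  intro s _
  unfold Spec_lexicographic_count_symbols lexicographic_count_symbols lexicographic_count_symbols_alt
  simp only []
  rw [main_chars s.toList, List.map_map]
  rfl
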